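-- pv_equiv track=rewrite | github.com/chanddu/NLP | samples/trainersample.py | genbigramNuniGramList
-- ===== SOURCE A (Python) =====
-- def genbigramNuniGramList(bigramsList,words,vocabulary,sentiment):
--     poswords = []
--     negwords = []
--     posbigrams = []
--     negbigrams = []
--     bigram_size = 0
--     for b in bigramsList:
--         bigram_size+=1
--     if(bigram_size>=1):
--         for i in range(0,bigram_size-1):
--             bigram1 = bigramsList[i]
--             word1 = bigram1[0] + ' ' + bigram1[1]
--             bigram2 = bigramsList[i+1]
--             word2 = bigram2[0] + ' ' + bigram2[1]
--             if word1 not in vocabulary and word2 not in vocabulary: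
--                 if sentiment == '+':
--                     poswords.append(bigram1[1])
--                 else:
--                     negwords.append(bigram1[1])
--             if sentiment == '+':
--                 posbigrams.append(word1)
--             else:
--                 negbigrams.append(word1)
--
--         if sentiment == '+':
--             posbigrams.append(bigramsList[bigram_size-1][0] + ' ' + bigramsList[bigram_size-1][1])
--         else:
--             negbigrams.append(bigramsList[bigram_size-1][0] + ' ' + bigramsList[bigram_size-1][1])
--     return poswords,negwords,posbigrams,negbigrams
-- ===== SOURCE B (Python) =====
-- def genbigramNuniGramList(bigramsList, words, vocabulary, sentiment):
--     # Run-based algorithm: a bigram at position i (i < n-1) contributes its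
--     # second token iff its joined string and the next one are both absent from
--     # the vocabulary, i.e. iff it is a non-final member of a maximal run of
--     # consecutive absent bigrams.  So we sweep once, collecting the current
--     # run of absent bigrams' second tokens, and flush all but the last of each
--     # run -- no index arithmetic, no lookahead, no special last-element branch.
--     s = [b[0] + ' ' + b[1] for b in bigramsList]
--     vocab = set(vocabulary)
--     ws = []
--     run = []
--     for b, w in zip(bigramsList, s):
--         if w in vocab:
--             ws += run[:-1]
--             run = []
--         else:
--             run.append(b[1])
--     ws += run[:-1]
--     if sentiment == '+':
--         return ws, [], s, []
--     return [], ws, [], s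
-- ===== Notes on version B (the rewrite author's own statement) =====
-- stated objective: alternative
-- what changed: Replaces A's counting loop plus index-with-lookahead loop plus separate last-element append by a run-based sweep: the joined strings are precomputed once (they ARE the returned bigram list), vocabulary is hashed into a set, and the word list is produced by collecting maximal runs of consecutive out-of-vocabulary bigrams and flushing all but the last member of each run -- no index arithmetic and no pairwise lookahead.
import Mathlib
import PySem

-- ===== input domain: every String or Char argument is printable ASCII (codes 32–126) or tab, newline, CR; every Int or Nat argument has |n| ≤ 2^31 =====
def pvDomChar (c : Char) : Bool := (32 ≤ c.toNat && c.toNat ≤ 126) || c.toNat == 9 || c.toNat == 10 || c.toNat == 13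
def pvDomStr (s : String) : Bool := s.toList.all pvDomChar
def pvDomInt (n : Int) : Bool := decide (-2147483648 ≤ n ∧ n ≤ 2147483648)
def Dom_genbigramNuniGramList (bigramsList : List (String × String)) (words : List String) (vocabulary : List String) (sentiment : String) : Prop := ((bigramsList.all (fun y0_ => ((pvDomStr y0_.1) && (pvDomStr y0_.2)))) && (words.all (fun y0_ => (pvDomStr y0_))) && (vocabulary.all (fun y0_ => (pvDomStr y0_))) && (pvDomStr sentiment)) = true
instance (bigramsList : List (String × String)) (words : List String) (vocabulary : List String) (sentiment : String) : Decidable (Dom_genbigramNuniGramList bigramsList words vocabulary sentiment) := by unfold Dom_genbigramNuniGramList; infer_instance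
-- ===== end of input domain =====

-- B replaces A's counting loop, index-with-lookahead loop and separate last-element
-- append by a run-based sweep over the precomputed joined strings with a hashed
-- vocabulary, flushing all but the last member of each maximal out-of-vocabulary run
-- (objective: alternative).  Both are pure; 'words' is unused by A and B alike.

-- ===== PORT A =====
def genbigramNuniGramList (bigramsList : List (String × String)) (words : List String) (vocabulary : List String) (sentiment : String) : List String × List String × List String × List String :=
  -- bigram_size counted by the explicit loop, as in A
  let bigram_size : Int := bigramsList.foldl (fun n _ => n + 1) (0 : Int)
  if bigram_size ≥ 1 then
    let st := (PySem.List.pyRange 0 (bigram_size - 1) 1).foldl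
      (fun (st : List String × List String × List String × List String) i =>
        -- indexing bigramsList[i], bigramsList[i+1]: always in range here, default never used
        let bigram1 := PySem.List.pyGetD bigramsList i ("", "")
        let word1 := bigram1.1 ++ " " ++ bigram1.2
        let bigram2 := PySem.List.pyGetD bigramsList (i + 1) ("", "")
        let word2 := bigram2.1 ++ " " ++ bigram2.2
        let st1 :=
          if ¬ vocabulary.contains word1 ∧ ¬ vocabulary.contains word2 then
            if sentiment = "+" then (st.1 ++ [bigram1.2], st.2.1, st.2.2.1, st.2.2.2)
            else (st.1, st.2.1 ++ [bigram1.2], st.2.2.1, st.2.2.2)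
          else st
        if sentiment = "+" then (st1.1, st1.2.1, st1.2.2.1 ++ [word1], st1.2.2.2)
        else (st1.1, st1.2.1, st1.2.2.1, st1.2.2.2 ++ [word1]))
      ([], [], [], [])
    let last := PySem.List.pyGetD bigramsList (bigram_size - 1) ("", "")
    let lastw := last.1 ++ " " ++ last.2
    if sentiment = "+" then (st.1, st.2.1, st.2.2.1 ++ [lastw], st.2.2.2)
    else (st.1, st.2.1, st.2.2.1, st.2.2.2 ++ [lastw])
  else ([], [], [], [])

-- ===== PORT B =====
-- the run-collecting sweep of B's loop: state = (flushed words, current run)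
def pvSweep (vocab : PySem.Set String) (l : List ((String × String) × String)) : List String × List String :=
  l.foldl (fun (st : List String × List String) x =>
      if PySem.Set.contains vocab x.2 then (st.1 ++ st.2.dropLast, ([] : List String))
      else (st.1, st.2 ++ [x.1.2])) ([], [])

def genbigramNuniGramList_alt (bigramsList : List (String × String)) (words : List String) (vocabulary : List String) (sentiment : String) : List String × List String × List String × List String :=
  let s := bigramsList.map (fun b => b.1 ++ " " ++ b.2)
  let vocab := PySem.Set.ofList vocabulary
  let st := pvSweep vocab (bigramsList.zip s)
  let ws := st.1 ++ st.2.dropLast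
  if sentiment = "+" then (ws, [], s, []) else ([], ws, [], s)

-- ===== PRECONDITION & SPEC =====
def Spec_genbigramNuniGramList (bigramsList : List (String × String)) (words : List String) (vocabulary : List String) (sentiment : String) (out : List String × List String × List String × List String) : Prop := out = genbigramNuniGramList_alt bigramsList words vocabulary sentiment
instance (bigramsList : List (String × String)) (words : List String) (vocabulary : List String) (sentiment : String) (out : List String × List String × List String × List String) : Decidable (Spec_genbigramNuniGramList bigramsList words vocabulary sentiment out) := by unfold Spec_genbigramNuniGramList; infer_instance

-- ===== CLAIM (what is proved, stated in full; the proofs are below) =====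
def Claim_equal_genbigramNuniGramList : Prop := ∀ (bigramsList : List (String × String)) (words : List String) (vocabulary : List String) (sentiment : String), Dom_genbigramNuniGramList bigramsList words vocabulary sentiment → Spec_genbigramNuniGramList bigramsList words vocabulary sentiment (genbigramNuniGramList bigramsList words vocabulary sentiment)

-- ===== LEMMAS AND PROOFS =====

-- the counting loop is the length
theorem pvCount_foldl {α : Type} (l : List α) (n : Int) :
    l.foldl (fun n _ => n + 1) n = n + l.length := by
  induction l generalizing n with
  | nil => simp
  | cons a t ih => simp [List.foldl_cons, ih]; ring

-- the index range maps to the list of consecutive pairs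
theorem pvPairs_map (bl : List (String × String)) (d : String × String) :
    (PySem.List.pyRange 0 ((bl.length : Int) - 1) 1).map
      (fun i => (PySem.List.pyGetD bl i d, PySem.List.pyGetD bl (i + 1) d))
      = bl.zip bl.tail := by
  rw [PySem.List.pyRange_one]
  apply List.ext_getElem
  · simp [List.length_zip]
  · intro k h1 h2
    simp only [List.length_map, List.length_range] at h1
    have hk : k + 1 < bl.length := by omega
    have hk0 : k < bl.length := by omega
    simp only [List.getElem_map, List.getElem_range, List.getElem_zip, zero_add]
    rw [show ((k : Int) + 1) = (((k + 1 : Nat)) : Int) by push_cast; ring,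
        PySem.List.pyGetD_natCast, PySem.List.pyGetD_natCast]
    simp [List.getD_eq_getElem?_getD, hk, hk0, List.getElem_tail]

theorem pvMapFst_zip_tail {α : Type} (l : List α) :
    (l.zip l.tail).map Prod.fst = l.dropLast := by
  induction l with
  | nil => simp
  | cons a t ih =>
    cases t with
    | nil => simp
    | cons b t2 => simpa using ih

-- the fold of A's loop body over the pair list, sentiment = '+'
theorem pvFoldA_pos (voc : List String)
    (P : List ((String × String) × (String × String))) (pw pb : List String) :
    P.foldl (fun (st : List String × List String × List String × List String) p =>
        let word1 := p.1.1 ++ " " ++ p.1.2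
        let word2 := p.2.1 ++ " " ++ p.2.2
        let st1 :=
          if ¬ voc.contains word1 ∧ ¬ voc.contains word2 then
            (st.1 ++ [p.1.2], st.2.1, st.2.2.1, st.2.2.2)
          else st
        (st1.1, st1.2.1, st1.2.2.1 ++ [word1], st1.2.2.2))
      (pw, [], pb, []) =
    (pw ++ (P.filter (fun p => !(voc.contains (p.1.1 ++ " " ++ p.1.2)) &&
                               !(voc.contains (p.2.1 ++ " " ++ p.2.2)))).map (fun p => p.1.2),
     [], pb ++ P.map (fun p => p.1.1 ++ " " ++ p.1.2), []) := by
  induction P generalizing pw pb with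
  | nil => simp
  | cons p t ih =>
    simp only [List.foldl_cons, List.filter_cons, List.map_cons]
    by_cases h : ¬ voc.contains (p.1.1 ++ " " ++ p.1.2) ∧ ¬ voc.contains (p.2.1 ++ " " ++ p.2.2)
    · have hb : (!(voc.contains (p.1.1 ++ " " ++ p.1.2)) &&
                 !(voc.contains (p.2.1 ++ " " ++ p.2.2))) = true := by
        simp only [Bool.and_eq_true, Bool.not_eq_true']
        exact ⟨by simpa using h.1, by simpa using h.2⟩
      simp only [if_pos h, hb, if_true, ih]
      simp
    · have hb : (!(voc.contains (p.1.1 ++ " " ++ p.1.2)) &&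
                 !(voc.contains (p.2.1 ++ " " ++ p.2.2))) = false := by
        by_contra hc
        apply h
        simp only [Bool.not_eq_false, Bool.and_eq_true, Bool.not_eq_true'] at hc
        exact ⟨by simpa using hc.1, by simpa using hc.2⟩
      simp only [if_neg h, hb, if_false, Bool.false_eq_true, ih]
      simp

-- same, sentiment ≠ '+'
theorem pvFoldA_neg (voc : List String)
    (P : List ((String × String) × (String × String))) (nw nb : List String) :
    P.foldl (fun (st : List String × List String × List String × List String) p =>
        let word1 := p.1.1 ++ " " ++ p.1.2
        let word2 := p.2.1 ++ " " ++ p.2.2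
        let st1 :=
          if ¬ voc.contains word1 ∧ ¬ voc.contains word2 then
            (st.1, st.2.1 ++ [p.1.2], st.2.2.1, st.2.2.2)
          else st
        (st1.1, st1.2.1, st1.2.2.1, st1.2.2.2 ++ [word1]))
      ([], nw, [], nb) =
    ([], nw ++ (P.filter (fun p => !(voc.contains (p.1.1 ++ " " ++ p.1.2)) &&
                               !(voc.contains (p.2.1 ++ " " ++ p.2.2)))).map (fun p => p.1.2),
     [], nb ++ P.map (fun p => p.1.1 ++ " " ++ p.1.2)) := by
  induction P generalizing nw nb with
  | nil => simp
  | cons p t ih =>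
    simp only [List.foldl_cons, List.filter_cons, List.map_cons]
    by_cases h : ¬ voc.contains (p.1.1 ++ " " ++ p.1.2) ∧ ¬ voc.contains (p.2.1 ++ " " ++ p.2.2)
    · have hb : (!(voc.contains (p.1.1 ++ " " ++ p.1.2)) &&
                 !(voc.contains (p.2.1 ++ " " ++ p.2.2))) = true := by
        simp only [Bool.and_eq_true, Bool.not_eq_true']
        exact ⟨by simpa using h.1, by simpa using h.2⟩
      simp only [if_pos h, hb, if_true, ih]
      simp
    · have hb : (!(voc.contains (p.1.1 ++ " " ++ p.1.2)) &&
                 !(voc.contains (p.2.1 ++ " " ++ p.2.2))) = false := by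
        by_contra hc
        apply h
        simp only [Bool.not_eq_false, Bool.and_eq_true, Bool.not_eq_true'] at hc
        exact ⟨by simpa using hc.1, by simpa using hc.2⟩
      simp only [if_neg h, hb, if_false, Bool.false_eq_true, ih]
      simp

-- B's joined list equals A's loop body words plus the final append
theorem pvB_s (bl : List (String × String)) (h : bl ≠ []) :
    bl.map (fun b => b.1 ++ " " ++ b.2)
      = (bl.zip bl.tail).map (fun p => p.1.1 ++ " " ++ p.1.2)
        ++ [(bl.getLast h).1 ++ " " ++ (bl.getLast h).2] := by
  have e : (bl.zip bl.tail).map (fun p => p.1.1 ++ " " ++ p.1.2)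
      = ((bl.zip bl.tail).map Prod.fst).map (fun b => b.1 ++ " " ++ b.2) := by
    simp [List.map_map]
  rw [e, pvMapFst_zip_tail]
  calc bl.map (fun b => b.1 ++ " " ++ b.2)
      = (bl.dropLast ++ [bl.getLast h]).map (fun b => b.1 ++ " " ++ b.2) := by
        rw [List.dropLast_append_getLast h]
    _ = _ := by simp

-- the final index bigram_size - 1 is the last element
theorem pvLast (bl : List (String × String)) (h : bl ≠ []) (d : String × String) :
    PySem.List.pyGetD bl ((bl.length : Int) - 1) d = bl.getLast h := by
  have hl : 0 < bl.length := List.length_pos_of_ne_nil h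
  have c : ((bl.length : Int) - 1) = ((bl.length - 1 : Nat) : Int) := by omega
  rw [c, PySem.List.pyGetD_natCast]
  rw [List.getLast_eq_getElem]
  simp [List.getD_eq_getElem?_getD, Nat.sub_lt hl Nat.one_pos]

-- set membership agrees with list membership
theorem pvSetContains (v : List String) (w : String) :
    PySem.Set.contains (PySem.Set.ofList v) w = v.contains w := by
  by_cases h : w ∈ v
  · rw [(PySem.Set.contains_iff _ _).2 ((PySem.Set.mem_ofList _ _).2 h)]
    simp [h]
  · have hc : PySem.Set.contains (PySem.Set.ofList v) w = false := by
      by_contra hcc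
      exact h ((PySem.Set.mem_ofList _ _).1 ((PySem.Set.contains_iff _ _).1 (by simpa using hcc)))
    simp [h]

-- the pairwise word list (proof-side abbreviation)
def pvPW (p : String → Bool) (l : List ((String × String) × String)) : List String :=
  ((l.zip l.tail).filter (fun q => !p q.1.2 && !p q.2.2)).map (fun q => q.1.1.2)

-- B's run-collecting sweep ends in the pairwise word list
theorem pvRun_fold (p : String → Bool) (l : List ((String × String) × String)) (ws run : List String) :
    (let st := l.foldl (fun (st : List String × List String) x =>
        if p x.2 then (st.1 ++ st.2.dropLast, ([] : List String))
        else (st.1, st.2 ++ [x.1.2])) (ws, run)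
     st.1 ++ st.2.dropLast)
    = ws ++ (match l with
             | [] => run.dropLast
             | x :: _ => (if p x.2 then run.dropLast else run) ++ pvPW p l) := by
  induction l generalizing ws run with
  | nil => simp
  | cons x t ih =>
    simp only [List.foldl_cons]
    by_cases hp : p x.2 = true
    · rw [if_pos hp, ih]
      cases t with
      | nil => simp [pvPW, hp]
      | cons y t2 =>
        by_cases hy : p y.2 = true
        · simp [pvPW, hp, hy, List.append_assoc]
        · simp [pvPW, hp, hy, List.append_assoc]
    · rw [if_neg hp, ih]
      cases t with
      | nil => simp [pvPW, hp]
      | cons y t2 =>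
        by_cases hy : p y.2 = true
        · simp [pvPW, hp, hy, List.append_assoc]
        · simp [pvPW, hp, hy, List.append_assoc]

-- zipping a list with its own image is mapping the pairing
theorem pvZipSelfMap (bl : List (String × String)) (j : (String × String) → String) :
    bl.zip (bl.map j) = bl.map (fun b => (b, j b)) := by
  induction bl with
  | nil => simp
  | cons b t ih => simp [ih]

-- the pairwise word list over the paired form equals A's filter-map shape
theorem pvPW_map (p : String → Bool) (bl : List (String × String)) :
    pvPW p (bl.map (fun b => (b, b.1 ++ " " ++ b.2)))
    = ((bl.zip bl.tail).filter (fun q => !p (q.1.1 ++ " " ++ q.1.2) &&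
                                         !p (q.2.1 ++ " " ++ q.2.2))).map (fun q => q.1.2) := by
  unfold pvPW
  rw [← List.map_tail, List.zip_map, List.filter_map, List.map_map]
  rfl

-- ===== VERDICT (by name: the statement is the Claim_ definition above) =====
theorem genbigramNuniGramList_spec : Claim_equal_genbigramNuniGramList := by
  intro bl words voc sent _
  unfold Spec_genbigramNuniGramList genbigramNuniGramList genbigramNuniGramList_alt
  simp only [pvCount_foldl, Int.zero_add]
  -- B's sweep reduces to the pairwise word list
  have hB : (pvSweep (PySem.Set.ofList voc) (bl.zip (bl.map (fun b => b.1 ++ " " ++ b.2)))).1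
        ++ (pvSweep (PySem.Set.ofList voc) (bl.zip (bl.map (fun b => b.1 ++ " " ++ b.2)))).2.dropLast
      = ((bl.zip bl.tail).filter (fun q => !(voc.contains (q.1.1 ++ " " ++ q.1.2)) &&
                                           !(voc.contains (q.2.1 ++ " " ++ q.2.2)))).map (fun q => q.1.2) := by
    have hc : (fun (st : List String × List String) (x : (String × String) × String) =>
          if PySem.Set.contains (PySem.Set.ofList voc) x.2 then (st.1 ++ st.2.dropLast, ([] : List String))
          else (st.1, st.2 ++ [x.1.2]))
        = (fun (st : List String × List String) (x : (String × String) × String) =>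
          if voc.contains x.2 then (st.1 ++ st.2.dropLast, ([] : List String))
          else (st.1, st.2 ++ [x.1.2])) := by
      funext st x
      rw [pvSetContains]
    unfold pvSweep
    rw [pvZipSelfMap, hc, pvRun_fold]
    cases bl with
    | nil => simp [pvPW]
    | cons b t =>
      simp only [List.nil_append, List.map_cons]
      rw [show ((b, b.1 ++ " " ++ b.2) :: List.map (fun b => (b, b.1 ++ " " ++ b.2)) t)
            = List.map (fun b => (b, b.1 ++ " " ++ b.2)) (b :: t) from rfl,
          pvPW_map (fun w => voc.contains w) (b :: t)]
      cases hv : voc.contains (b.1 ++ " " ++ b.2) <;> simp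
  by_cases hnil : bl = []
  · subst hnil
    simp [pvSweep]
  · have hl : 0 < bl.length := List.length_pos_of_ne_nil hnil
    have hge : (1 : Int) ≤ (bl.length : Int) := by exact_mod_cast hl
    rw [if_pos (by exact hge)]
    -- turn A's index fold into a fold over the pair list
    rw [show (PySem.List.pyRange 0 ((bl.length : Int) - 1) 1).foldl
          (fun (st : List String × List String × List String × List String) i =>
            let bigram1 := PySem.List.pyGetD bl i ("", "")
            let word1 := bigram1.1 ++ " " ++ bigram1.2
            let bigram2 := PySem.List.pyGetD bl (i + 1) ("", "")
            let word2 := bigram2.1 ++ " " ++ bigram2.2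
            let st1 :=
              if ¬ voc.contains word1 ∧ ¬ voc.contains word2 then
                if sent = "+" then (st.1 ++ [bigram1.2], st.2.1, st.2.2.1, st.2.2.2)
                else (st.1, st.2.1 ++ [bigram1.2], st.2.2.1, st.2.2.2)
              else st
            if sent = "+" then (st1.1, st1.2.1, st1.2.2.1 ++ [word1], st1.2.2.2)
            else (st1.1, st1.2.1, st1.2.2.1, st1.2.2.2 ++ [word1]))
          ([], [], [], [])
        = (bl.zip bl.tail).foldl
          (fun (st : List String × List String × List String × List String) p =>
            let word1 := p.1.1 ++ " " ++ p.1.2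
            let word2 := p.2.1 ++ " " ++ p.2.2
            let st1 :=
              if ¬ voc.contains word1 ∧ ¬ voc.contains word2 then
                if sent = "+" then (st.1 ++ [p.1.2], st.2.1, st.2.2.1, st.2.2.2)
                else (st.1, st.2.1 ++ [p.1.2], st.2.2.1, st.2.2.2)
              else st
            if sent = "+" then (st1.1, st1.2.1, st1.2.2.1 ++ [word1], st1.2.2.2)
            else (st1.1, st1.2.1, st1.2.2.1, st1.2.2.2 ++ [word1]))
          ([], [], [], []) from by
      rw [← pvPairs_map bl ("", ""), List.foldl_map]]
    by_cases hs : sent = "+"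
    · simp only [hs, if_pos rfl, if_true, reduceIte]
      rw [pvFoldA_pos voc (bl.zip bl.tail) [] []]
      simp only [List.nil_append]
      rw [pvLast bl hnil, hB, pvB_s bl hnil]
    · simp only [hs, if_neg hs, reduceIte]
      rw [pvFoldA_neg voc (bl.zip bl.tail) [] []]
      simp only [List.nil_append]
      rw [pvLast bl hnil, hB, pvB_s bl hnil]
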